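-- pv_equiv track=rewrite | github.com/devUuung/CuKKS | cukks/batching/amcp.py | compute_packing_factor
-- ===== SOURCE A (Python) =====
-- def compute_packing_factor(num_heads: int, seq_len: int, batch_size: int, total_slots: int) -> int:
--     divisors: list[int] = []
--     candidate = 1
--     while candidate * candidate <= num_heads:
--         if num_heads % candidate == 0:
--             divisors.append(candidate)
--             pair = num_heads // candidate
--             if pair != candidate:
--                 divisors.append(pair)
--         candidate += 1
--
--     valid = [
--         factor
--         for factor in divisors
--         if factor * batch_size * seq_len <= total_slots
--     ]
--     if not valid:
--         raise ValueError(
--             "No valid AMCP packing factor: requires k * batch_size * seq_len <= total_slots "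
--             f"for some k dividing num_heads={num_heads}; got seq_len={seq_len}, "
--             f"batch_size={batch_size}, total_slots={total_slots}"
--         )
--     return max(valid)
-- ===== SOURCE B (Python) =====
-- def compute_packing_factor(num_heads: int, seq_len: int, batch_size: int, total_slots: int) -> int:
--     for k in range(num_heads, 0, -1):
--         if num_heads % k == 0 and k * batch_size * seq_len <= total_slots:
--             return k
--     raise ValueError(
--         "No valid AMCP packing factor: requires k * batch_size * seq_len <= total_slots "
--         f"for some k dividing num_heads={num_heads}; got seq_len={seq_len}, "
--         f"batch_size={batch_size}, total_slots={total_slots}"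
--     )
-- ===== Notes on version B (the rewrite author's own statement) =====
-- stated objective: simpler
-- what changed: Replaces the sqrt-bounded divisor enumeration plus filter plus max with a single descending scan k = num_heads..1 that returns the first k dividing num_heads and fitting the slot capacity.
import Mathlib
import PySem

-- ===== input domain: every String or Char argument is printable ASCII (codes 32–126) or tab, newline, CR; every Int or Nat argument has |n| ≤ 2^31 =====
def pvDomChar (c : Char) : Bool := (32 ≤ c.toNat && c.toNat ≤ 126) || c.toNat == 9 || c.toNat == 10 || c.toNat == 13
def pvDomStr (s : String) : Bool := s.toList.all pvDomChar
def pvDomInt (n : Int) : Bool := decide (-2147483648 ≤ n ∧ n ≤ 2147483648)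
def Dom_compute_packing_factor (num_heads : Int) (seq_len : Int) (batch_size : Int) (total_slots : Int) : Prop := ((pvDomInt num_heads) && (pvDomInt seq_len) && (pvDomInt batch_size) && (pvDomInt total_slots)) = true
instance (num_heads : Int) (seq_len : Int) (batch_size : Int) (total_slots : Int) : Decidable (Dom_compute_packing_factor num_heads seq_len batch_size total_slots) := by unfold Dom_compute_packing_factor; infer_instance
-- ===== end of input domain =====

-- B replaces A's sqrt-bounded divisor enumeration + filter + max by a single descending scan
-- returning the first (hence largest) k dividing num_heads that fits the slot capacity (simpler; not faster).

-- ===== PORT A =====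
-- the 'while candidate * candidate <= num_heads' loop collecting divisor pairs
def pvDivLoop (n : Int) (c : Int) (acc : List Int) : List Int :=
  if h : c * c ≤ n then
    pvDivLoop n (c + 1)
      (if PySem.Int.mod n c = 0 then
        (if PySem.Int.floordiv n c ≠ c then acc ++ [c, PySem.Int.floordiv n c]
         else acc ++ [c])
       else acc)
  else acc
termination_by (n + 1 - c).toNat
decreasing_by
  have h1 : 2 * c - 1 ≤ n := by nlinarith [sq_nonneg (c - 1)]
  have h2 : 0 ≤ n := le_trans (mul_self_nonneg c) h
  omega

def compute_packing_factor (num_heads : Int) (seq_len : Int) (batch_size : Int) (total_slots : Int) : Int :=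
  let divisors := pvDivLoop num_heads 1 []
  let valid := divisors.filter (fun f => decide (f * batch_size * seq_len ≤ total_slots))
  match PySem.List.max? valid (fun x => x) with
  | some m => m
  | none => 0  -- Python raises ValueError here; excluded by Pre_

-- ===== PORT B =====
-- 'for k in range(num_heads, 0, -1): …'
def pvScanLoop (n : Int) (s : Int) (b : Int) (t : Int) (k : Int) : Int :=
  if h : 1 ≤ k then
    if PySem.Int.mod n k = 0 ∧ k * b * s ≤ t then k
    else pvScanLoop n s b t (k - 1)
  else 0  -- loop exhausted: Python raises ValueError; excluded by Pre_
termination_by k.toNat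
decreasing_by omega

def compute_packing_factor_alt (num_heads : Int) (seq_len : Int) (batch_size : Int) (total_slots : Int) : Int :=
  pvScanLoop num_heads seq_len batch_size total_slots num_heads

-- ===== PRECONDITION & SPEC =====
-- Pre_ excludes exactly the inputs on which both A and B raise ValueError (no divisor of num_heads
-- fits the capacity): since 1 and num_heads are always divisors and k*batch_size*seq_len is monotone
-- in k for either sign of batch_size*seq_len, some divisor fits iff one of the two extremes fits.
def Pre_compute_packing_factor (num_heads : Int) (seq_len : Int) (batch_size : Int) (total_slots : Int) : Prop :=
  1 ≤ num_heads ∧ (batch_size * seq_len ≤ total_slots ∨ num_heads * batch_size * seq_len ≤ total_slots)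
instance (num_heads : Int) (seq_len : Int) (batch_size : Int) (total_slots : Int) : Decidable (Pre_compute_packing_factor num_heads seq_len batch_size total_slots) := by unfold Pre_compute_packing_factor; infer_instance

def pvWitness_compute_packing_factor : Int × Int × Int × Int := (8, 4, 2, 32)

def Spec_compute_packing_factor (num_heads : Int) (seq_len : Int) (batch_size : Int) (total_slots : Int) (out : Int) : Prop := out = compute_packing_factor_alt num_heads seq_len batch_size total_slots
instance (num_heads : Int) (seq_len : Int) (batch_size : Int) (total_slots : Int) (out : Int) : Decidable (Spec_compute_packing_factor num_heads seq_len batch_size total_slots out) := by unfold Spec_compute_packing_factor; infer_instance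

-- ===== CLAIM (what is proved, stated in full; the proofs are below) =====
def Claim_equal_compute_packing_factor : Prop := ∀ (num_heads : Int) (seq_len : Int) (batch_size : Int) (total_slots : Int), Dom_compute_packing_factor num_heads seq_len batch_size total_slots → Pre_compute_packing_factor num_heads seq_len batch_size total_slots → Spec_compute_packing_factor num_heads seq_len batch_size total_slots (compute_packing_factor num_heads seq_len batch_size total_slots)

-- ===== LEMMAS AND PROOFS =====

theorem pvDivLoop_mono (n c : Int) (acc : List Int) : acc ⊆ pvDivLoop n c acc := by
  induction c, acc using pvDivLoop.induct n with
  | case1 c acc h ih =>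
    rw [pvDivLoop, dif_pos h]
    refine List.Subset.trans ?_ ih
    split_ifs <;> simp
  | case2 c acc h => rw [pvDivLoop, dif_neg h]; exact fun x hx => hx

-- every element the loop collects is c or n//c for some candidate e ≥ c with e*e ≤ n dividing n
theorem pvDivLoop_sound (n c : Int) (acc : List Int) :
    ∀ x ∈ pvDivLoop n c acc,
    x ∈ acc ∨ ∃ e, c ≤ e ∧ e * e ≤ n ∧ PySem.Int.mod n e = 0 ∧ (x = e ∨ x = PySem.Int.floordiv n e) := by
  induction c, acc using pvDivLoop.induct n with
  | case1 c acc h ih =>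
    intro x hx
    rw [pvDivLoop, dif_pos h] at hx
    rcases ih x hx with hacc | ⟨e, he1, he2, he3, he4⟩
    · split_ifs at hacc with h1 h2
      · simp only [List.mem_append, List.mem_cons, List.not_mem_nil, or_false] at hacc
        rcases hacc with hacc | hacc | hacc
        · exact Or.inl hacc
        · exact Or.inr ⟨c, le_refl c, h, h1, Or.inl hacc⟩
        · exact Or.inr ⟨c, le_refl c, h, h1, Or.inr hacc⟩
      · simp only [List.mem_append, List.mem_singleton] at hacc
        rcases hacc with hacc | hacc
        · exact Or.inl hacc
        · exact Or.inr ⟨c, le_refl c, h, h1, Or.inl hacc⟩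
      · exact Or.inl hacc
    · exact Or.inr ⟨e, by omega, he2, he3, he4⟩
  | case2 c acc h =>
    intro x hx
    rw [pvDivLoop, dif_neg h] at hx
    exact Or.inl hx

-- every candidate e ≥ c with e*e ≤ n dividing n contributes e and n//e to the loop's result
theorem pvDivLoop_complete (n c : Int) (acc : List Int) :
    ∀ e, 1 ≤ c → c ≤ e → e * e ≤ n → PySem.Int.mod n e = 0 →
    e ∈ pvDivLoop n c acc ∧ PySem.Int.floordiv n e ∈ pvDivLoop n c acc := by
  induction c, acc using pvDivLoop.induct n with
  | case1 c acc h ih =>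
    intro e hc1 hce hee hdvd
    rcases eq_or_lt_of_le hce with heq | hlt
    · subst heq
      rw [pvDivLoop, dif_pos h]
      constructor <;>
      · apply pvDivLoop_mono
        rw [if_pos hdvd]
        by_cases hq : PySem.Int.floordiv n c ≠ c
        · rw [if_pos hq]; simp
        · rw [if_neg hq]; push Not at hq; simp [hq]
    · rw [pvDivLoop, dif_pos h]
      exact ih e (by omega) (by omega) hee hdvd
  | case2 c acc h =>
    intro e hc1 hce hee hdvd
    exact absurd (by nlinarith : c * c ≤ n) h

-- A's divisor list holds exactly the divisors of n in [1, n]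
theorem pvMemDiv (n x : Int) (hn : 1 ≤ n) :
    x ∈ pvDivLoop n 1 [] ↔ (1 ≤ x ∧ x ≤ n ∧ x ∣ n) := by
  constructor
  · intro hx
    rcases pvDivLoop_sound n 1 [] x hx with h | ⟨e, he1, he2, he3, hx'⟩
    · simp at h
    have hed : e ∣ n := (PySem.Int.mod_eq_zero_iff_dvd n e).mp he3
    have hen : e ≤ n := by nlinarith
    rcases hx' with rfl | rfl
    · exact ⟨he1, hen, hed⟩
    · have hfd : PySem.Int.floordiv n e = n / e := PySem.Int.floordiv_eq_ediv_of_pos (by omega)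
      obtain ⟨d, hd⟩ := hed
      have hdv : n / e = d := by rw [hd]; exact Int.mul_ediv_cancel_left d (by omega)
      rw [hfd, hdv]
      have hd1 : 1 ≤ d := by nlinarith
      refine ⟨hd1, by nlinarith, ⟨e, by linarith [hd]⟩⟩
  · rintro ⟨hx1, hxn, hxd⟩
    have hmod : PySem.Int.mod n x = 0 := (PySem.Int.mod_eq_zero_iff_dvd n x).mpr hxd
    by_cases hsq : x * x ≤ n
    · exact (pvDivLoop_complete n 1 [] x le_rfl hx1 hsq hmod).1
    · obtain ⟨d, hd⟩ := hxd
      have hd1 : 1 ≤ d := by nlinarith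
      have hdx : d < x := by nlinarith
      have hdd : d * d ≤ n := by nlinarith
      have hmodd : PySem.Int.mod n d = 0 := (PySem.Int.mod_eq_zero_iff_dvd n d).mpr ⟨x, by linarith [hd]⟩
      have hmem := (pvDivLoop_complete n 1 [] d le_rfl hd1 hdd hmodd).2
      have hfd : PySem.Int.floordiv n d = x := by
        rw [PySem.Int.floordiv_eq_ediv_of_pos (by omega), hd, mul_comm]
        exact Int.mul_ediv_cancel_left x (by omega)
      rwa [hfd] at hmem

-- B's descending scan returns r when r satisfies the test and nothing above r (up to k) does
theorem pvScan_eq (n s b t : Int) :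
    ∀ k r, 1 ≤ r → r ≤ k →
    (PySem.Int.mod n r = 0 ∧ r * b * s ≤ t) →
    (∀ j, r < j → j ≤ k → ¬ (PySem.Int.mod n j = 0 ∧ j * b * s ≤ t)) →
    pvScanLoop n s b t k = r := by
  intro k
  induction k using pvScanLoop.induct n s b t with
  | case1 k hk hP =>
    intro r hr1 hrk hPr hmax
    rcases eq_or_lt_of_le hrk with rfl | hlt
    · rw [pvScanLoop, dif_pos hk, if_pos hP]
    · exact absurd hP (hmax k hlt le_rfl)
  | case2 k hk hnP ih =>
    intro r hr1 hrk hPr hmax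
    have hrk' : r ≤ k - 1 := by
      rcases eq_or_lt_of_le hrk with rfl | hlt
      · exact absurd hPr hnP
      · omega
    rw [pvScanLoop, dif_pos hk, if_neg hnP]
    exact ih r hr1 hrk' hPr (fun j hj1 hj2 => hmax j hj1 (by omega))
  | case3 k hk =>
    intro r hr1 hrk hPr hmax
    omega

theorem pvMain (n s b t : Int) (hn : 1 ≤ n) (hcap : b * s ≤ t ∨ n * b * s ≤ t) :
    compute_packing_factor n s b t = compute_packing_factor_alt n s b t := by
  set valid := (pvDivLoop n 1 []).filter (fun f => decide (f * b * s ≤ t)) with hvalid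
  have hne : valid ≠ [] := by
    rcases hcap with h1 | h2
    · have hin : (1:Int) ∈ valid := by
        rw [hvalid, List.mem_filter]
        exact ⟨(pvMemDiv n 1 hn).mpr ⟨le_rfl, hn, one_dvd n⟩, by simpa using h1⟩
      exact List.ne_nil_of_mem hin
    · have hin : n ∈ valid := by
        rw [hvalid, List.mem_filter]
        exact ⟨(pvMemDiv n n hn).mpr ⟨hn, le_rfl, dvd_refl n⟩, by simpa using h2⟩
      exact List.ne_nil_of_mem hin
  obtain ⟨m, hm⟩ : ∃ m, PySem.List.max? valid (fun x => x) = some m := by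
    cases hq : PySem.List.max? valid (fun x => x) with
    | none => exact absurd ((PySem.List.max?_eq_none_iff valid (fun x => x)).mp hq) hne
    | some m => exact ⟨m, rfl⟩
  have hmmem := PySem.List.max?_mem hm
  have hmmax := PySem.List.max?_isMax hm
  rw [hvalid, List.mem_filter] at hmmem
  obtain ⟨hmdiv, hmle⟩ := hmmem
  rw [pvMemDiv n m hn] at hmdiv
  obtain ⟨hm1, hmn, hmd⟩ := hmdiv
  have hA : compute_packing_factor n s b t = m := by
    show (match PySem.List.max? valid (fun x => x) with | some m => m | none => (0:Int)) = m
    rw [hm]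
  have hB : compute_packing_factor_alt n s b t = m := by
    unfold compute_packing_factor_alt
    apply pvScan_eq n s b t n m hm1 hmn
    · exact ⟨(PySem.Int.mod_eq_zero_iff_dvd n m).mpr hmd, by simpa using hmle⟩
    · rintro j hj1 hj2 ⟨hjm, hjle⟩
      have hjv : j ∈ valid := by
        rw [hvalid, List.mem_filter]
        refine ⟨(pvMemDiv n j hn).mpr ⟨by omega, hj2, (PySem.Int.mod_eq_zero_iff_dvd n j).mp hjm⟩, by simpa using hjle⟩
      have hle := hmmax j hjv
      simp at hle
      omega
  rw [hA, hB]

-- ===== VERDICT (by name: the statement is the Claim_ definition above) =====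
theorem compute_packing_factor_spec : Claim_equal_compute_packing_factor := by
  intro n s b t _hdom hpre
  unfold Spec_compute_packing_factor
  exact pvMain n s b t hpre.1 hpre.2
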